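-- pv_equiv track=rewrite | github.com/ajaydeepsingh/practice | codeSignal/mutateTheArray.py | mutateTheArray
-- ===== SOURCE A (Python) =====
-- def mutateTheArray(n, a):
--
--     b = [None] * n
--
--     if (len(a) == 1):
--         b[0] = a[0]
--         return b
--
--     for i in range(0, n):
--         if i == 0:
--             b[i] = 0 + a[i] + a[i + 1]
--         elif i == n-1:
--             b[i] = a[i-1] + a[i] + 0
--         else:
--             b[i] = a[i-1] + a[i] + a[i + 1]
--
--
--     return b
-- ===== SOURCE B (Python) =====
-- def mutateTheArray(n, a):
--     w = a[:max(n, 0)]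
--     left = [0] + w[:-1]
--     right = w[1:] + [0]
--     return [l + x + r for l, x, r in zip(left, w, right)]
-- ===== Notes on version B (the rewrite author's own statement) =====
-- stated objective: alternative
-- what changed: Instead of an index loop with i==0 / i==n-1 branches and a len(a)==1 special case, B builds two shifted copies of the window (zero-padded left and right neighbor lists) in staged passes and zips the three lists together elementwise; no index arithmetic or boundary branches remain.
-- outside the precondition, e.g. on mutateTheArray(1, [1, 2]): A returns [3], B returns [1]; on mutateTheArray(0, [5]): A raises IndexError, B returns []; on mutateTheArray(3, [7]): A returns [7, None, None], B returns [7]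
import Mathlib
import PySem

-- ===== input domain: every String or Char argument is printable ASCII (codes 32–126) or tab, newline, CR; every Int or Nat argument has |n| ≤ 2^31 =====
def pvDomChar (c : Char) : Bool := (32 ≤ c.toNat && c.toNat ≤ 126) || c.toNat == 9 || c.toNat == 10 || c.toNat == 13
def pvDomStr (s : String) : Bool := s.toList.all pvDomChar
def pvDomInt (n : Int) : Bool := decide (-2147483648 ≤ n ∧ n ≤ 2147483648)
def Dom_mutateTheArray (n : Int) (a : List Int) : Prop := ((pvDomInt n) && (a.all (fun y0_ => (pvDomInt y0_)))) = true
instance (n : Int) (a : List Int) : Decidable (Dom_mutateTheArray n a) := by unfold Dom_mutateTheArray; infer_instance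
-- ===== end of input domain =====

-- B replaces A's index loop with boundary branches and len(a)==1 special case by staged
-- passes: zero-padded left/right shifted copies of the window, zipped elementwise (objective: alternative).

-- ===== PORT A =====
-- Python writes into b = [None]*n; inside Pre_ every returned cell is an int, so the
-- port builds the written values directly (map over range(0,n)); the len(a)==1 branch
-- returns [a[0]] since Pre_ forces n = 1 there. pyGetD _ _ 0 = a[i]; in range under Pre_.
def mutateTheArray (n : Int) (a : List Int) : List Int :=
  if a.length = 1 then
    [PySem.List.pyGetD a 0 0]
  else
    (PySem.List.pyRange 0 n 1).map (fun i =>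
      if i = 0 then
        0 + PySem.List.pyGetD a i 0 + PySem.List.pyGetD a (i + 1) 0
      else if i = n - 1 then
        PySem.List.pyGetD a (i - 1) 0 + PySem.List.pyGetD a i 0 + 0
      else
        PySem.List.pyGetD a (i - 1) 0 + PySem.List.pyGetD a i 0 + PySem.List.pyGetD a (i + 1) 0)

-- ===== PORT B =====
-- w = a[:max(n,0)]; left = [0] + w[:-1]; right = w[1:] + [0]; zip the three lists.
def mutateTheArray_alt (n : Int) (a : List Int) : List Int :=
  let w := PySem.List.slice a none (some (max n 0))
  let left := 0 :: PySem.List.slice w none (some (-1))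
  let right := PySem.List.slice w (some 1) none ++ [0]
  ((left.zip w).zip right).map (fun p => p.1.1 + p.1.2 + p.2)

-- ===== PRECONDITION & SPEC =====
-- Pre_ excludes n > len(a) (and n ≠ 1 with len(a) = 1), where A raises IndexError or leaves
-- a None in the result, and the single case n = 1 with len(a) ≥ 2, a mismatched-length call
-- on which A's i==0 branch returns [a[0]+a[1]] while B's first-n-elements window returns [a[0]]
-- — both accidental readings of an n that is supposed to equal len(a).
def Pre_mutateTheArray (n : Int) (a : List Int) : Prop :=
  (a.length = 1 → n = 1) ∧ ¬(n = 1 ∧ 2 ≤ a.length) ∧ n ≤ (a.length : Int)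
instance (n : Int) (a : List Int) : Decidable (Pre_mutateTheArray n a) := by
  unfold Pre_mutateTheArray; infer_instance
def pvWitness_mutateTheArray : Int × List Int := (4, [3, -1, 2, 7])

def Spec_mutateTheArray (n : Int) (a : List Int) (out : List Int) : Prop := out = mutateTheArray_alt n a
instance (n : Int) (a : List Int) (out : List Int) : Decidable (Spec_mutateTheArray n a out) := by unfold Spec_mutateTheArray; infer_instance

-- ===== CLAIM (what is proved, stated in full; the proofs are below) =====
def Claim_equal_mutateTheArray : Prop := ∀ (n : Int) (a : List Int), Dom_mutateTheArray n a → Pre_mutateTheArray n a → Spec_mutateTheArray n a (mutateTheArray n a)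

-- ===== LEMMAS AND PROOFS =====

-- pyGetD at a nonnegative in-range nat index is getElem
theorem pv_pyGetD_nat (a : List Int) (k : Nat) (h : k < a.length) :
    PySem.List.pyGetD a (k : Int) 0 = a[k] := by
  rw [PySem.List.pyGetD_natCast, List.getD_eq_getElem _ _ h]

-- getElem of B's zipped-and-mapped triple
theorem pv_zip3_getElem (left w right : List Int) (i : Nat)
    (h1 : i < left.length) (h2 : i < w.length) (h3 : i < right.length) :
    (((left.zip w).zip right).map (fun p => p.1.1 + p.1.2 + p.2))[i]'(by
      simp [List.length_zip]; omega) = left[i] + w[i] + right[i] := by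
  simp [List.getElem_zip]

-- ===== VERDICT (by name: the statement is the Claim_ definition above) =====
theorem mutateTheArray_spec : Claim_equal_mutateTheArray := by
  intro n a _ hpre
  obtain ⟨h1, hnot, hle⟩ := hpre
  unfold Spec_mutateTheArray mutateTheArray mutateTheArray_alt
  by_cases hlen : a.length = 1
  · -- single-element case: Pre_ forces n = 1
    have hn : n = 1 := h1 hlen
    subst hn
    match a, hlen with
    | [x], _ =>
      simp [PySem.List.slice, PySem.List.clampIdx,
        PySem.List.pyGetD, PySem.List.pyIdx?, PySem.List.pyGet?]
  · rw [if_neg hlen]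
    by_cases hn0 : n ≤ 0
    · -- empty range: both sides are []
      have hmax : max n 0 = ((0 : Nat) : Int) := by omega
      rw [PySem.List.pyRange_one_eq_nil hn0, List.map_nil, hmax,
        PySem.List.slice_to_natCast, List.take_zero]
      simp
    · -- main case: 2 ≤ n ≤ len a
      replace hn0 : 0 < n := by omega
      have hn2 : 2 ≤ n := by
        have hlen2 : 2 ≤ a.length := by omega
        have : n ≠ 1 := fun hh => hnot ⟨hh, hlen2⟩
        omega
      set m := n.toNat with hmdef
      have hnm : n = (m : Int) := by omega
      have hm2 : 2 ≤ m := by omega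
      have hmlen : m ≤ a.length := by omega
      rw [hnm, show max ((m : Nat) : Int) 0 = ((m : Nat) : Int) from by omega,
        PySem.List.slice_to_natCast, PySem.List.pyRange_one]
      simp only [Int.sub_zero, Int.toNat_natCast, Int.zero_add, List.map_map,
        PySem.List.slice_to_neg_one, PySem.List.slice_from_one]
      set w := a.take m with hwdef
      have hw : w.length = m := by simp [hwdef]; omega
      have hleft : (0 :: w.dropLast).length = m := by simp [hw]; omega
      have hright : (w.tail ++ [0]).length = m := by simp [hw]; omega
      apply List.ext_getElem
      · simp [List.length_zip, hw, hleft, hright]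
      · intro i hi hi2
        have him : i < m := by simpa using hi
        have hia : i < a.length := by omega
        rw [List.getElem_map, List.getElem_range,
          pv_zip3_getElem (0 :: w.dropLast) w (w.tail ++ [0]) i
            (by omega) (by omega) (by omega)]
        simp only [Function.comp_apply]
        have hwi : w[i]'(by omega) = a[i] := by
          simp [hwdef, List.getElem_take]
        by_cases hi0 : i = 0
        · subst hi0
          have e1 : ((0 : Nat) : Int) + 1 = ((1 : Nat) : Int) := by norm_num
          rw [if_pos (by norm_num : (((0 : Nat) : Int)) = 0), e1,
            pv_pyGetD_nat a 0 hia, pv_pyGetD_nat a 1 (by omega)]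
          have hl : (0 :: w.dropLast)[0]'(by omega) = 0 := rfl
          have hr : (w.tail ++ [0])[0]'(by omega) = a[1] := by
            rw [List.getElem_append_left (by simp [hw]; omega)]
            simp [List.getElem_tail, hwdef, List.getElem_take]
          rw [hl, hr, hwi]; ring
        · have hi1 : 1 ≤ i := Nat.one_le_iff_ne_zero.mpr hi0
          have hne0 : ((i : Int)) ≠ 0 := by exact_mod_cast hi0
          rw [if_neg hne0]
          have ec1 : ((i : Int)) - 1 = (((i - 1 : Nat)) : Int) := by omega
          have hl : (0 :: w.dropLast)[i]'(by omega) = a[i - 1] := by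
            obtain ⟨j, rfl⟩ : ∃ j, i = j + 1 := ⟨i - 1, by omega⟩
            rw [List.getElem_cons_succ, List.getElem_dropLast]
            simp [hwdef, List.getElem_take]
          by_cases hlast : i = m - 1
          · have hkl : (i : Int) = (m : Int) - 1 := by omega
            rw [if_pos hkl, ec1, pv_pyGetD_nat a (i - 1) (by omega),
              pv_pyGetD_nat a i hia]
            have hr : (w.tail ++ [0])[i]'(by omega) = 0 := by
              rw [List.getElem_append_right (by simp [hw]; omega)]
              simp
            rw [hl, hr, hwi]
          · have hkl : ((i : Int)) ≠ (m : Int) - 1 := by omega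
            rw [if_neg hkl, ec1]
            have ec2 : ((i : Int)) + 1 = (((i + 1 : Nat)) : Int) := by omega
            rw [ec2, pv_pyGetD_nat a (i - 1) (by omega), pv_pyGetD_nat a i hia,
              pv_pyGetD_nat a (i + 1) (by omega)]
            have hr : (w.tail ++ [0])[i]'(by omega) = a[i + 1] := by
              rw [List.getElem_append_left (by simp [hw]; omega)]
              simp [List.getElem_tail, hwdef, List.getElem_take]
            rw [hl, hr, hwi]
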